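-- pv_equiv track=rewrite | github.com/north-brook/broker-cli | cli/src/market.py | _symbols_with_last_only
-- ===== SOURCE A (Python) =====
-- def _symbols_with_last_only(quotes: list[dict[str, object]]) -> list[str]:
--     symbols: list[str] = []
--     for quote in quotes:
--         has_last = quote.get("last") is not None
--         missing_top = quote.get("bid") is None and quote.get("ask") is None
--         if has_last and missing_top:
--             symbols.append(str(quote.get("symbol") or "?"))
--     return list(dict.fromkeys(symbols))
-- ===== SOURCE B (Python) =====
-- def _symbols_with_last_only(quotes: list[dict[str, object]]) -> list[str]:
--     symbols: list[str] = []
--     for quote in reversed(quotes):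
--         has_last = quote.get("last") is not None
--         missing_top = quote.get("bid") is None and quote.get("ask") is None
--         if has_last and missing_top:
--             sym = str(quote.get("symbol") or "?")
--             symbols = [sym] + [s for s in symbols if s != sym]
--     return symbols
-- ===== Notes on version B (the rewrite author's own statement) =====
-- stated objective: alternative
-- what changed: B traverses the quotes in reverse and maintains the answer directly: each qualifying symbol is moved to the front while later duplicates are filtered out of the accumulator, so there is no intermediate filtered list and no dict.fromkeys/seen-set dedup pass; it trades A's O(n) hashing for an O(n*k) list rebuild (k = distinct kept symbols).
import Mathlib
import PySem

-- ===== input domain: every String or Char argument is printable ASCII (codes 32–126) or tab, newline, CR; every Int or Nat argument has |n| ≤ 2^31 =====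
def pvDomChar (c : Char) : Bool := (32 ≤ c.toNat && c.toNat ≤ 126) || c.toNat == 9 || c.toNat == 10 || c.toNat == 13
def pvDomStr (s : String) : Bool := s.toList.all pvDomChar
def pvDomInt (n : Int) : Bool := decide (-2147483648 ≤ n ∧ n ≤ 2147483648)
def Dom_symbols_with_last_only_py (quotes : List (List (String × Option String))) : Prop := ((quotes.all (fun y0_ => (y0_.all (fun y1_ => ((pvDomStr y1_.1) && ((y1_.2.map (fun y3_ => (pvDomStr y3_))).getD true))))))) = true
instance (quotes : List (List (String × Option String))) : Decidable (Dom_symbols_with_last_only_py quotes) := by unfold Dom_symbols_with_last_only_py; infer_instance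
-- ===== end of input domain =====

-- B builds the answer back-to-front: reverse traversal that moves each qualifying symbol to the
-- front and filters later duplicates out of the accumulator; objective: alternative (no dedup pass).


-- shared helpers: the guard and the symbol string, identical Python in A and B
-- quote.get(k) (default None) on a dict whose values are Option String
def pvGet (quote : List (String × Option String)) (k : String) : Option String :=
  (PySem.Dict.mk quote).getD k none

-- 'quote.get("last") is not None and quote.get("bid") is None and quote.get("ask") is None'
def pvGuard (quote : List (String × Option String)) : Bool :=
  (pvGet quote "last").isSome && !(pvGet quote "bid").isSome && !(pvGet quote "ask").isSome

-- 'str(quote.get("symbol") or "?")'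
def pvSym (quote : List (String × Option String)) : String :=
  match pvGet quote "symbol" with
  | some s => if s = "" then "?" else s
  | none => "?"

-- ===== PORT A =====
def symbols_with_last_only_py (quotes : List (List (String × Option String))) : List String :=
  let symbols : List String :=
    quotes.foldl (fun symbols quote =>
      if pvGuard quote then symbols ++ [pvSym quote] else symbols) []
  PySem.List.dedup symbols

-- ===== PORT B =====
-- 'for quote in reversed(quotes): … symbols = [sym] + [s for s in symbols if s != sym]'
def symbols_with_last_only_py_alt (quotes : List (List (String × Option String))) : List String :=
  quotes.reverse.foldl (fun symbols quote =>
    if pvGuard quote then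
      let sym := pvSym quote
      sym :: symbols.filter (fun s => s != sym)
    else symbols) []

-- ===== PRECONDITION & SPEC =====
def Spec_symbols_with_last_only_py (quotes : List (List (String × Option String))) (out : List String) : Prop := out = symbols_with_last_only_py_alt quotes
instance (quotes : List (List (String × Option String))) (out : List String) : Decidable (Spec_symbols_with_last_only_py quotes out) := by unfold Spec_symbols_with_last_only_py; infer_instance

-- ===== CLAIM (what is proved, stated in full; the proofs are below) =====
def Claim_equal_symbols_with_last_only_py : Prop := ∀ (quotes : List (List (String × Option String))), Dom_symbols_with_last_only_py quotes → Spec_symbols_with_last_only_py quotes (symbols_with_last_only_py quotes)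

-- ===== LEMMAS AND PROOFS =====

-- B's loop over the reversed quotes is a foldr over the filtered, mapped symbol list
theorem pvB_foldr (quotes : List (List (String × Option String))) :
    symbols_with_last_only_py_alt quotes =
      ((quotes.filter pvGuard).map pvSym).foldr
        (fun x r => x :: r.filter (fun s => s != x)) [] := by
  unfold symbols_with_last_only_py_alt
  rw [List.foldl_reverse]
  induction quotes with
  | nil => rfl
  | cons q qs ih => cases h : pvGuard q <;> simp [h, ih]

-- head-first dedup of any symbol list equals Python's dict.fromkeys order (PySem.List.dedup)
theorem pvFoldr_dedup (ss : List String) :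
    ss.foldr (fun x r => x :: r.filter (fun s => s != x)) [] = PySem.List.dedup ss := by
  induction ss with
  | nil => rfl
  | cons x ss ih =>
    rw [List.foldr_cons, ih, PySem.List.dedup_eq_ofList, PySem.List.dedup_eq_ofList,
      PySem.Set.ofList_cons]
    rfl

-- ===== VERDICT (by name: the statement is the Claim_ definition above) =====
theorem symbols_with_last_only_py_spec : Claim_equal_symbols_with_last_only_py := by
  intro quotes _
  unfold Spec_symbols_with_last_only_py
  rw [pvB_foldr, pvFoldr_dedup]
  unfold symbols_with_last_only_py
  rw [PySem.List.foldl_append_if, List.nil_append]
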